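-- pv_equiv track=rewrite | github.com/tillchen/EPIJudge | epi_judge_python/max_product_all_but_one.py | find_biggest_n_minus_one_product_1
-- ===== SOURCE A (Python) =====
-- from typing import List
--
-- def find_biggest_n_minus_one_product_1(A: List[int]) -> int:
--     products = [1] * len(A)
--     products_in_reverse = [1] * len(A)
--     current = 1
--     for i, x in enumerate(A):
--         current *= x
--         products[i] = current
--     current = 1
--     for i in range(len(A) - 1, -1, -1):
--         current *= A[i]
--         products_in_reverse[i] = current
--     result = 0
--     for i in range(len(A)):
--         prefix = products[i - 1] if i - 1 >= 0 else 1
--         suffix = products_in_reverse[i + 1] if i + 1 < len(A) else 1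
--         result = max(result, prefix * suffix)
--     return result
-- ===== SOURCE B (Python) =====
-- def find_biggest_n_minus_one_product_1(A):
--     result = 0
--     for i in range(len(A)):
--         product = 1
--         for j in range(len(A)):
--             if j != i:
--                 product *= A[j]
--         result = max(result, product)
--     return result
-- ===== Notes on version B (the rewrite author's own statement) =====
-- stated objective: simpler
-- what changed: Replaces the three passes with prefix- and suffix-product arrays by a direct double loop that multiplies every element except the excluded index and takes the running max.
import Mathlib
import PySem

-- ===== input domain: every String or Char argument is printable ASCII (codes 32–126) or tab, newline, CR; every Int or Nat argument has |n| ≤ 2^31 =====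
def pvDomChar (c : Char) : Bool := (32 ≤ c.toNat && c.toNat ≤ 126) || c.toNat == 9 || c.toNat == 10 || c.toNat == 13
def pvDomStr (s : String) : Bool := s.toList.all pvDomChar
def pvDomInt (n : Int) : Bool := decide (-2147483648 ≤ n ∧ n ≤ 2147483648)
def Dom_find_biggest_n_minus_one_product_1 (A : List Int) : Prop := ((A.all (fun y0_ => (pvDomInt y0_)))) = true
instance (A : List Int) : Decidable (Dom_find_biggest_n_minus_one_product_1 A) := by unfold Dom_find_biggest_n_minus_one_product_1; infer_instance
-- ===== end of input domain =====

-- B replaces A's three passes with prefix/suffix product arrays by a direct double loop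
-- (product of all elements except the excluded index, running max); objective: simpler.


-- ===== PORT A =====
-- body of "for i, x in enumerate(A): current *= x; products[i] = current"
def pvAStep1 (st : Int × List Int) (ix : Int × Int) : Int × List Int :=
  let current := st.1 * ix.2
  (current, PySem.List.pySetD st.2 ix.1 current)

-- body of "for i in range(len(A)-1, -1, -1): current *= A[i]; products_in_reverse[i] = current"
def pvAStep2 (A : List Int) (st : Int × List Int) (i : Int) : Int × List Int :=
  let current := st.1 * PySem.List.pyGetD A i 0
  (current, PySem.List.pySetD st.2 i current)

-- "products" after the first loop (initialised to [1] * len(A))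
def pvProducts (A : List Int) : List Int :=
  ((PySem.List.enumerate A 0).foldl pvAStep1 (1, List.replicate A.length (1 : Int))).2

-- "products_in_reverse" after the second loop (initialised to [1] * len(A))
def pvProductsRev (A : List Int) : List Int :=
  ((PySem.List.pyRange ((A.length : Int) - 1) (-1) (-1)).foldl (pvAStep2 A)
    (1, List.replicate A.length (1 : Int))).2

def find_biggest_n_minus_one_product_1 (A : List Int) : Int :=
  (PySem.List.pyRange 0 (A.length : Int) 1).foldl
    (fun result i =>
      let pfx := if i - 1 ≥ 0 then PySem.List.pyGetD (pvProducts A) (i - 1) 0 else 1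
      let sfx := if i + 1 < (A.length : Int) then PySem.List.pyGetD (pvProductsRev A) (i + 1) 0 else 1
      max result (pfx * sfx)) 0

-- ===== PORT B =====
def find_biggest_n_minus_one_product_1_alt (A : List Int) : Int :=
  (PySem.List.pyRange 0 (A.length : Int) 1).foldl
    (fun result i =>
      let product := (PySem.List.pyRange 0 (A.length : Int) 1).foldl
        (fun p j => if j ≠ i then p * PySem.List.pyGetD A j 0 else p) 1
      max result product) 0

-- ===== PRECONDITION & SPEC =====
def Spec_find_biggest_n_minus_one_product_1 (A : List Int) (out : Int) : Prop := out = find_biggest_n_minus_one_product_1_alt A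
instance (A : List Int) (out : Int) : Decidable (Spec_find_biggest_n_minus_one_product_1 A out) := by unfold Spec_find_biggest_n_minus_one_product_1; infer_instance

-- ===== CLAIM (what is proved, stated in full; the proofs are below) =====
def Claim_equal_find_biggest_n_minus_one_product_1 : Prop := ∀ (A : List Int), Dom_find_biggest_n_minus_one_product_1 A → Spec_find_biggest_n_minus_one_product_1 A (find_biggest_n_minus_one_product_1 A)

-- ===== LEMMAS AND PROOFS =====

lemma pvGetD_set_ne (l : List Int) (i j : Nat) (h : i ≠ j) (v d : Int) :
    (l.set i v).getD j d = l.getD j d := by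
  simp [List.getD_eq_getElem?_getD, List.getElem?_set_ne h]

lemma pvGetD_set_self (l : List Int) (i : Nat) (h : i < l.length) (v d : Int) :
    (l.set i v).getD i d = v := by
  simp [List.getD_eq_getElem?_getD, List.getElem?_set_self, h]

-- The first loop of A: after it, slot k of the array holds c times the product of xs[0..k-s].
lemma pvPrefixFold_getD (xs : List Int) (s : Nat) (c : Int) (l : List Int)
    (hlen : s + xs.length ≤ l.length) (k : Nat) (d : Int) :
    (((PySem.List.enumerate xs (s : Int)).foldl pvAStep1 (c, l)).2).getD k d =
      if s ≤ k ∧ k < s + xs.length then c * (xs.take (k - s + 1)).prod else l.getD k d := by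
  induction xs generalizing s c l with
  | nil =>
    simp only [PySem.List.enumerate_nil, List.foldl_nil, List.length_nil]
    rw [if_neg (by omega)]
  | cons x xs ih =>
    rw [PySem.List.enumerate_cons]
    have hcast : (s : Int) + 1 = ((s + 1 : Nat) : Int) := by push_cast; ring
    simp only [List.foldl_cons, pvAStep1, hcast, PySem.List.pySetD_natCast]
    simp only [List.length_cons] at hlen
    have hlen' : (s + 1) + xs.length ≤ (l.set s (c * x)).length := by
      simp only [List.length_set]; omega
    rw [ih (s + 1) (c * x) _ hlen']
    simp only [List.length_set, List.length_cons]
    by_cases h1 : k < s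
    · rw [if_neg (by omega), if_neg (by omega), pvGetD_set_ne _ _ _ (by omega)]
    · by_cases h2 : k = s
      · subst h2
        rw [if_neg (by omega), if_pos (by omega), pvGetD_set_self _ _ (by omega)]
        have h3 : k - k + 1 = 1 := by omega
        rw [h3]
        simp
      · by_cases h3 : k < s + 1 + xs.length
        · rw [if_pos (by omega), if_pos (by omega)]
          have he : k - s + 1 = (k - (s + 1) + 1) + 1 := by omega
          rw [he, List.take_succ_cons, List.prod_cons]
          ring
        · rw [if_neg (by omega), if_neg (by omega), pvGetD_set_ne _ _ _ (by omega)]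

-- The second loop of A: after counting down from t-1 to 0, slot k holds c times the product of A[k..t-1].
lemma pvRevFold_getD (A : List Int) (t : Nat) (ht : t ≤ A.length) (c : Int) (l : List Int)
    (hlen : A.length ≤ l.length) (k : Nat) (d : Int) :
    (((PySem.List.pyRange ((t : Int) - 1) (-1) (-1)).foldl (pvAStep2 A) (c, l)).2).getD k d =
      if k < t then c * ((A.take t).drop k).prod else l.getD k d := by
  induction t generalizing c l with
  | zero =>
    rw [PySem.List.pyRange_neg_one_eq_nil (by omega)]
    simp
  | succ t ih =>
    have hcons : PySem.List.pyRange (((t + 1 : Nat) : Int) - 1) (-1) (-1)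
        = (t : Int) :: PySem.List.pyRange ((t : Int) - 1) (-1) (-1) := by
      have h : (((t + 1 : Nat) : Int) - 1) = (t : Int) := by push_cast; ring
      rw [h, PySem.List.pyRange_neg_one_cons (by omega)]
    rw [hcons]
    have htA : t < A.length := by omega
    simp only [List.foldl_cons, pvAStep2, PySem.List.pySetD_natCast, PySem.List.pyGetD_natCast]
    have hlen' : A.length ≤ (l.set t (c * A.getD t 0)).length := by
      simp only [List.length_set]; omega
    rw [ih (by omega) (c * A.getD t 0) _ hlen']
    have hAget : A.getD t 0 = A[t] := List.getD_eq_getElem A 0 htA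
    have htake : A.take (t + 1) = A.take t ++ [A[t]] := by
      rw [List.take_succ, List.getElem?_eq_getElem htA]
      rfl
    by_cases h1 : k < t
    · rw [if_pos h1, if_pos (by omega), htake,
        List.drop_append_of_le_length (by rw [List.length_take]; omega), List.prod_append]
      simp only [List.prod_cons, List.prod_nil, mul_one, hAget]
      ring
    · by_cases h2 : k = t
      · subst h2
        rw [if_neg (by omega), if_pos (by omega), htake,
          List.drop_append_of_le_length (by rw [List.length_take]; omega),
          List.drop_of_length_le (by rw [List.length_take]; omega),
          pvGetD_set_self _ _ (by omega)]
        rw [List.nil_append, List.prod_cons, List.prod_nil, mul_one, hAget]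
      · rw [if_neg (by omega), if_neg (by omega), pvGetD_set_ne _ _ _ (by omega)]

-- fold of running products is the product of the mapped list
lemma pvFoldlMul (l : List Int) (f : Int → Int) (c : Int) :
    l.foldl (fun p j => p * f j) c = c * (l.map f).prod := by
  induction l generalizing c with
  | nil => simp
  | cons x xs ih => simp [ih]; ring

-- B's inner loop computes the product of A with index i removed
lemma pvInner_eq (A : List Int) (i : Int) (h0 : 0 ≤ i) (hi : i < (A.length : Int)) :
    (PySem.List.pyRange 0 (A.length : Int) 1).foldl
        (fun p j => if j ≠ i then p * PySem.List.pyGetD A j 0 else p) 1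
      = (A.take i.toNat).prod * (A.drop (i.toNat + 1)).prod := by
  rw [show (PySem.List.pyRange 0 (A.length : Int) 1).foldl
        (fun p j => if j ≠ i then p * PySem.List.pyGetD A j 0 else p) 1
      = (PySem.List.pyRange 0 (A.length : Int) 1).foldl
        (fun p j => p * (if j ≠ i then PySem.List.pyGetD A j 0 else 1)) 1 from
    PySem.List.foldl_congr_mem _ _ _ 1 (by intro acc x _; by_cases h : x = i <;> simp [h])]
  rw [pvFoldlMul, one_mul]
  rw [PySem.List.pyRange_one_append 0 i ((A.length : Int)) h0 hi.le,
    PySem.List.pyRange_one_append i (i + 1) ((A.length : Int)) (by omega) (by omega),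
    PySem.List.pyRange_one_singleton]
  rw [List.map_append, List.map_append, List.prod_append, List.prod_append]
  have hmid : (([i].map (fun j => if j ≠ i then PySem.List.pyGetD A j 0 else 1))).prod = 1 := by
    simp
  have hpre : ((PySem.List.pyRange 0 i 1).map (fun j => if j ≠ i then PySem.List.pyGetD A j 0 else 1)).prod
      = (A.take i.toNat).prod := by
    rw [List.map_congr_left (fun j hj => by
      have hj' := PySem.List.mem_pyRange_one.mp hj
      rw [if_pos (by omega)])]
    rw [PySem.List.pyRange_one, List.map_map]
    have h1 : ∀ k ∈ List.range (i - 0).toNat,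
        ((fun j => PySem.List.pyGetD A j 0) ∘ fun m : Nat => 0 + (m : Int)) k = A.getD k 0 := by
      intro k _
      simp
    rw [List.map_congr_left h1]
    have h2 : (i - 0).toNat = i.toNat := by omega
    rw [h2]
    congr 1
    apply List.ext_getElem
    · simp
      omega
    · intro n hn1 hn2
      have hnA : n < A.length := by
        simp at hn1
        omega
      simp [List.getElem?_eq_getElem hnA]
  have hsuf : ((PySem.List.pyRange (i + 1) ((A.length : Int)) 1).map
        (fun j => if j ≠ i then PySem.List.pyGetD A j 0 else 1)).prod
      = (A.drop (i.toNat + 1)).prod := by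
    rw [List.map_congr_left (fun j hj => by
      have hj' := PySem.List.mem_pyRange_one.mp hj
      rw [if_pos (by omega)])]
    rw [PySem.List.map_pyGetD_pyRange' A 0 (show (0:Int) ≤ i + 1 by omega)]
    have he : (i + 1).toNat = i.toNat + 1 := by omega
    rw [he]
  rw [hmid, hpre, hsuf]
  ring

-- A's prefix term at index i equals the product of A[0..i-1]
lemma pvPrefixVal (A : List Int) (i : Int) (h0 : 0 ≤ i) (hi : i < (A.length : Int)) :
    (if i - 1 ≥ 0 then PySem.List.pyGetD (pvProducts A) (i - 1) 0 else 1)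
      = (A.take i.toNat).prod := by
  by_cases h : i - 1 ≥ 0
  · rw [if_pos h]
    unfold pvProducts
    rw [PySem.List.pyGetD_of_nonneg _ _ (by omega)]
    have h00 : ((0 : Nat) : Int) = (0 : Int) := by norm_num
    have hL := pvPrefixFold_getD A 0 1 (List.replicate A.length (1 : Int)) (by simp) (i - 1).toNat 0
    rw [h00] at hL
    rw [hL, if_pos (by constructor <;> omega)]
    have he : (i - 1).toNat - 0 + 1 = i.toNat := by omega
    rw [he, one_mul]
  · rw [if_neg h]
    have h0' : i.toNat = 0 := by omega
    simp [h0']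

-- A's suffix term at index i equals the product of A[i+1..]
lemma pvSuffixVal (A : List Int) (i : Int) (h0 : 0 ≤ i) (hi : i < (A.length : Int)) :
    (if i + 1 < (A.length : Int) then PySem.List.pyGetD (pvProductsRev A) (i + 1) 0 else 1)
      = (A.drop (i.toNat + 1)).prod := by
  by_cases h : i + 1 < (A.length : Int)
  · rw [if_pos h]
    unfold pvProductsRev
    rw [PySem.List.pyGetD_of_nonneg _ _ (by omega)]
    rw [pvRevFold_getD A A.length (le_refl _) 1 _ (by simp) (i + 1).toNat 0]
    rw [if_pos (by omega), List.take_length, one_mul]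
    have he : (i + 1).toNat = i.toNat + 1 := by omega
    rw [he]
  · rw [if_neg h]
    have hd : A.length ≤ i.toNat + 1 := by omega
    simp [List.drop_of_length_le hd]

-- the per-index values of A's third loop and of B's outer loop agree
lemma pvStep_eq (A : List Int) (acc x : Int) (h0 : 0 ≤ x) (h1 : x < (A.length : Int)) :
    max acc ((if x - 1 ≥ 0 then PySem.List.pyGetD (pvProducts A) (x - 1) 0 else 1) *
        (if x + 1 < (A.length : Int) then PySem.List.pyGetD (pvProductsRev A) (x + 1) 0 else 1))
      = max acc ((PySem.List.pyRange 0 (A.length : Int) 1).foldl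
        (fun p j => if j ≠ x then p * PySem.List.pyGetD A j 0 else p) 1) := by
  rw [pvPrefixVal A x h0 h1, pvSuffixVal A x h0 h1, pvInner_eq A x h0 h1]

-- ===== VERDICT (by name: the statement is the Claim_ definition above) =====
theorem find_biggest_n_minus_one_product_1_spec : Claim_equal_find_biggest_n_minus_one_product_1 := by
  intro A _
  unfold Spec_find_biggest_n_minus_one_product_1
  unfold find_biggest_n_minus_one_product_1 find_biggest_n_minus_one_product_1_alt
  refine PySem.List.foldl_congr_mem _ _ _ _ ?_
  intro acc x hx
  obtain ⟨hx0, hx1⟩ := PySem.List.mem_pyRange_one.mp hx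
  exact pvStep_eq A acc x hx0 hx1
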